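-- pv_equiv track=rewrite | github.com/Chen-Wang-CUHK/cnn-dailymail | utils.py | add_others_names_func
-- ===== SOURCE A (Python) =====
-- UTR_SPLITTER = '|'
--
-- def add_others_names_func(utr_list):
--     # collect the names of all the speakers
--     names = []
--     for utr in utr_list:
--         name = utr.split(':')[0].strip()
--         if name not in names:
--             names.append(name)
--
--     enhanced_utr_list = []
--     for utr in utr_list:
--         name = utr.split(':')[0].strip()
--         other_names = [n for n in names if n != name] + ['.']
--         enhanced_utr = utr + ' {} '.format(UTR_SPLITTER) + ' '.join(other_names)
--         enhanced_utr_list.append(enhanced_utr)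
--     return enhanced_utr_list
-- ===== SOURCE B (Python) =====
-- UTR_SPLITTER = '|'
--
-- def add_others_names_func(utr_list):
--     # compute each utterance's speaker name once
--     pairs = [(utr, utr.split(':')[0].strip()) for utr in utr_list]
--     # unique names, first occurrence order
--     names = list(dict.fromkeys(name for _, name in pairs))
--     # precompute the appended tail once per unique name
--     suffix = {}
--     for name in names:
--         suffix[name] = ' {} '.format(UTR_SPLITTER) + ' '.join([n for n in names if n != name] + ['.'])
--     return [utr + suffix[name] for utr, name in pairs]
-- ===== Notes on version B (the rewrite author's own statement) =====
-- stated objective: alternative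
-- what changed: B computes each utterance's speaker name once, dedups names via dict.fromkeys, and precomputes the ' | '-joined other-names string once per unique name in a dict, so each utterance does a lookup instead of re-filtering and re-joining the name list.
import Mathlib
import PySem

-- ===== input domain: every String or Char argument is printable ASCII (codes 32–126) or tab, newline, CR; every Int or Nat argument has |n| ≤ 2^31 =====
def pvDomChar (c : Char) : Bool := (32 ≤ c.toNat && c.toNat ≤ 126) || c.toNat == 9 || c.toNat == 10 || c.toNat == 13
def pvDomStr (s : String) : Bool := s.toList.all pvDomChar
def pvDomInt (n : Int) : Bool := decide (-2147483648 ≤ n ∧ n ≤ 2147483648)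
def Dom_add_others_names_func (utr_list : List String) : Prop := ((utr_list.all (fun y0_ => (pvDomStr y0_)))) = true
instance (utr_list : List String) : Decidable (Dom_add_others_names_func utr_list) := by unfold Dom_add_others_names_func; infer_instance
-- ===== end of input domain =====

-- B computes each speaker name once and precomputes the " | "-joined other-names tail once per
-- unique speaker (dict lookup per utterance) instead of rebuilding it for every utterance; same return value.

-- name = utr.split(':')[0].strip()   (split(':') is never empty, so [0] cannot raise)
def pvName (utr : String) : String :=
  PySem.Str.strip (PySem.List.pyGetD ((PySem.Str.split? utr ":").getD []) 0 "")

-- ===== PORT A =====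
def add_others_names_func (utr_list : List String) : List String :=
  let names := utr_list.foldl (fun names utr =>
    let name := pvName utr
    if name ∈ names then names else names ++ [name]) []
  utr_list.foldl (fun acc utr =>
    let name := pvName utr
    let other_names := (names.filter (fun n => n ≠ name)) ++ ["."]
    let enhanced := utr ++ " | " ++ PySem.Str.join " " other_names
    acc ++ [enhanced]) []

-- ===== PORT B =====
def add_others_names_func_alt (utr_list : List String) : List String :=
  let pairs := utr_list.map (fun utr => (utr, pvName utr))
  let names := PySem.List.dedup (pairs.map Prod.snd)
  let suffix : PySem.Dict String String := names.foldl (fun d name =>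
    d.insert name (" | " ++ PySem.Str.join " " ((names.filter (fun n => n ≠ name)) ++ ["."]))) PySem.Dict.empty
  pairs.map (fun p => p.1 ++ suffix.getD p.2 "")

-- ===== PRECONDITION & SPEC =====
def Spec_add_others_names_func (utr_list : List String) (out : List String) : Prop := out = add_others_names_func_alt utr_list
instance (utr_list : List String) (out : List String) : Decidable (Spec_add_others_names_func utr_list out) := by unfold Spec_add_others_names_func; infer_instance

-- ===== CLAIM (what is proved, stated in full; the proofs are below) =====
def Claim_equal_add_others_names_func : Prop := ∀ (utr_list : List String), Dom_add_others_names_func utr_list → Spec_add_others_names_func utr_list (add_others_names_func utr_list)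

-- ===== LEMMAS AND PROOFS =====

-- A's dedup loop is Set.ofList (= PySem.List.dedup) of the names
lemma namesA_eq (utr_list : List String) :
    utr_list.foldl (fun names utr =>
      let name := pvName utr
      if name ∈ names then names else names ++ [name]) [] =
    PySem.List.dedup (utr_list.map pvName) := by
  rw [PySem.List.dedup_eq_ofList, PySem.Set.ofList_eq_foldl, List.foldl_map]
  apply PySem.List.foldl_congr_mem
  intro s x _
  simp [PySem.Set.add, List.contains_eq_mem]

-- getD of the fold-built dict: the last insert of k wins, and every insert of k stores f k
lemma getD_foldl_insert (l : List String) (f : String → String) (d : PySem.Dict String String) (k : String) :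
    (l.foldl (fun d n => d.insert n (f n)) d).getD k "" =
    if k ∈ l then f k else d.getD k "" := by
  induction l generalizing d with
  | nil => simp
  | cons a t ih =>
    simp only [List.foldl_cons, ih, List.mem_cons]
    by_cases ht : k ∈ t
    · simp [ht]
    · by_cases hk : k = a
      · subst hk
        simp [ht, PySem.Dict.getD, PySem.Dict.get?_insert_self]
      · simp [ht, hk, PySem.Dict.getD, PySem.Dict.get?_insert_of_ne _ _ hk]

-- ===== VERDICT (by name: the statement is the Claim_ definition above) =====
theorem add_others_names_func_spec : Claim_equal_add_others_names_func := by
  intro utr_list _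
  unfold Spec_add_others_names_func add_others_names_func add_others_names_func_alt
  simp only [List.map_map, Function.comp_def, namesA_eq]
  rw [PySem.List.foldl_append_singleton_eq_map, List.nil_append]
  apply List.map_congr_left
  intro utr hmem
  rw [getD_foldl_insert]
  have hmemn : pvName utr ∈ PySem.List.dedup (utr_list.map pvName) := by
    rw [PySem.List.mem_dedup]
    exact List.mem_map.mpr ⟨utr, hmem, rfl⟩
  rw [if_pos hmemn, String.append_assoc]
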